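-- pv_equiv track=rewrite | github.com/llouis0622/Algorithm_Deep_Dive | Programmers/기초 문제/코드 처리하기.py | solution
-- ===== SOURCE A (Python) =====
-- def solution(code):
--     mode = 0
--     res = ''
--     for i in range(len(code)):
--         if code[i] == '1':
--             mode = 1 - mode
--         else:
--             if mode == 0:
--                 if code[i] != 1:
--                     if i % 2 == 0:
--                         res += code[i]
--                 elif code[i] == 1:
--                     mode = 1
--             elif mode == 1:
--                 if code[i] != 1:
--                     if i % 2 == 1:
--                         res += code[i]
--                 elif code[i] == 1:
--                     mode = 0
--     if res == '':
--         return 'EMPTY'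
--     else:
--         return res
-- ===== SOURCE B (Python) =====
-- def solution(code):
--     kept = ''.join(c for c in code if c != '1')[::2]
--     return kept if kept else 'EMPTY'
-- ===== Notes on version B (the rewrite author's own statement) =====
-- stated objective: simpler
-- what changed: Replaces the stateful mode-toggling index loop (with its dead str-vs-int branches) by the closed form it computes: delete the toggle characters and keep every second remaining character, since a character is kept exactly when the number of earlier kept-type characters is even; the work moves into C-level str.replace/slicing.
import Mathlib
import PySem

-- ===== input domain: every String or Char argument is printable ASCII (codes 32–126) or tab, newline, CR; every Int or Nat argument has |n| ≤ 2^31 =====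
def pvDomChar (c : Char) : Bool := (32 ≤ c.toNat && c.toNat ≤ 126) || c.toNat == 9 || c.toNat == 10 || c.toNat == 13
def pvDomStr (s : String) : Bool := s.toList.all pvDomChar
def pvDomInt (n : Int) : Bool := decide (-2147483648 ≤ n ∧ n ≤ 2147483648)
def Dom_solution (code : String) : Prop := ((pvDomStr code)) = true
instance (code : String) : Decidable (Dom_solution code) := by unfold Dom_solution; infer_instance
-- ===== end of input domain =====

-- B replaces A's stateful mode-toggling index loop by its closed form (drop the toggle chars, keep
-- every second remaining char); simpler, and measured faster by constant factor (C-level replace/slice).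


-- ===== PORT A =====
-- A's for-loop over range(len(code)) with code[i], as the obvious structural recursion over the
-- characters carrying the index i and the state (mode, res); branches in A's order.
-- A's inner 'if code[i] != 1' compares a str to the int 1, hence is always True in Python (and its
-- elif is dead code); it is transcribed as the always-taken branch it is.
def solutionLoop : List Char → Int → Int → List Char → Int × List Char
  | [], _, mode, res => (mode, res)
  | c :: t, i, mode, res =>
    if c = '1' then solutionLoop t (i + 1) (1 - mode) res
    else if mode = 0 then
      solutionLoop t (i + 1) mode (if PySem.Int.mod i 2 = 0 then res ++ [c] else res)
    else if mode = 1 then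
      solutionLoop t (i + 1) mode (if PySem.Int.mod i 2 = 1 then res ++ [c] else res)
    else solutionLoop t (i + 1) mode res

def solution (code : String) : String :=
  let r := solutionLoop code.toList 0 0 []
  if r.2 = [] then "EMPTY" else String.ofList r.2

-- ===== PORT B =====
-- ''.join(c for c in code if c != '1')  →  List.filter;  [::2]  →  PySem.List.slice? with step 2
-- (step 2 ≠ 0, so slice? is always `some`; Python slicing never raises here).
def solution_alt (code : String) : String :=
  let kept := code.toList.filter (fun c => c != '1')
  let sliced := (PySem.List.slice? kept none none 2).getD []
  if sliced = [] then "EMPTY" else String.ofList sliced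

-- ===== PRECONDITION & SPEC =====
def Spec_solution (code : String) (out : String) : Prop := out = solution_alt code
instance (code : String) (out : String) : Decidable (Spec_solution code out) := by unfold Spec_solution; infer_instance

-- ===== CLAIM (what is proved, stated in full; the proofs are below) =====
def Claim_equal_solution : Prop := ∀ (code : String), Dom_solution code → Spec_solution code (solution code)

-- ===== LEMMAS AND PROOFS =====

-- every-second-element pickers: pvEvens keeps indices 0,2,4,…; pvOdds keeps 1,3,5,…
mutual
def pvEvens : List Char → List Char
  | [] => []
  | c :: t => c :: pvOdds t
def pvOdds : List Char → List Char
  | [] => []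
  | _ :: t => pvEvens t
end

-- the index-form of a step-2 slice, reduced to the structural picker
theorem pvFilterMap_range_eq_evens : ∀ xs : List Char,
    List.filterMap (fun k : Nat => xs[2*k]?) (List.range ((xs.length+1)/2)) = pvEvens xs
  | [] => by simp [pvEvens]
  | [a] => by simp [pvEvens, pvOdds]
  | a :: b :: t => by
    have ih := pvFilterMap_range_eq_evens t
    have hc : ((a :: b :: t).length + 1) / 2 = (t.length + 1) / 2 + 1 := by simp; omega
    rw [hc, List.range_succ_eq_map, List.filterMap_cons, List.filterMap_map]
    simp only [Nat.mul_zero, List.getElem?_cons_zero]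
    have h2 : ∀ k : Nat, (a :: b :: t)[2 * Nat.succ k]? = t[2*k]? := by
      intro k
      have h3 : 2 * Nat.succ k = 2*k + 1 + 1 := by omega
      rw [h3, List.getElem?_cons_succ, List.getElem?_cons_succ]
    simp only [Function.comp_def, h2]
    rw [ih]
    simp [pvEvens, pvOdds]

-- B's [::2] slice is pvEvens
theorem pvSlice2_eq_evens (xs : List Char) :
    (PySem.List.slice? xs none none 2).getD [] = pvEvens xs := by
  rw [← pvFilterMap_range_eq_evens xs]
  simp only [PySem.List.slice?, PySem.List.sliceIndices]
  norm_num
  have hcount : (if 0 < xs.length then (((xs.length : Int) + 2 - 1) / 2).toNat else 0)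
      = (xs.length + 1) / 2 := by split <;> omega
  rw [hcount]
  apply List.filterMap_congr
  intro k _
  have h : ((2 : Int) * (k : Int)).toNat = 2 * k := by omega
  rw [h]

-- A's loop invariant: from state (i, mode) the appended characters are exactly the even-
-- (resp. odd-) indexed elements of the '1'-free remainder, depending on the parity of i - mode.
theorem pvLoop_eq (cs : List Char) :
    ∀ (i mode : Int) (res : List Char), mode = 0 ∨ mode = 1 →
      (solutionLoop cs i mode res).2 =
        res ++ (if (i - mode) % 2 = 0 then pvEvens else pvOdds)
                 (cs.filter (fun c => c != '1')) := by
  have hmod : ∀ j : Int, PySem.Int.mod j 2 = j % 2 :=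
    fun j => PySem.Int.mod_eq_emod_of_pos (by norm_num)
  induction cs with
  | nil =>
    intro i mode res _
    simp only [solutionLoop, List.filter_nil]
    split <;> simp [pvEvens, pvOdds]
  | cons c t ih =>
    intro i mode res hm
    by_cases h1 : c = '1'
    · subst h1
      rw [solutionLoop, if_pos rfl, ih (i+1) (1-mode) res (by omega)]
      have h2 : (i + 1 - (1 - mode)) % 2 = (i - mode) % 2 := by omega
      rw [h2]
      simp
    · have hf : (c :: t).filter (fun c => c != '1') = c :: t.filter (fun c => c != '1') := by
        simp [h1]
      rw [solutionLoop, if_neg h1, hf]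
      rcases hm with hm | hm <;> subst hm
      · rw [if_pos rfl, ih (i+1) 0 _ (Or.inl rfl), hmod]
        by_cases he : i % 2 = 0
        · rw [if_pos he, if_pos (by omega : (i - 0) % 2 = 0),
              if_neg (by omega : ¬ (i + 1 - 0) % 2 = 0)]
          simp [pvEvens]
        · rw [if_neg he, if_neg (by omega : ¬ (i - 0) % 2 = 0),
              if_pos (by omega : (i + 1 - 0) % 2 = 0)]
          simp [pvOdds]
      · rw [if_neg (by norm_num), if_pos rfl, ih (i+1) 1 _ (Or.inr rfl), hmod]
        by_cases he : i % 2 = 1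
        · rw [if_pos he, if_pos (by omega : (i - 1) % 2 = 0),
              if_neg (by omega : ¬ (i + 1 - 1) % 2 = 0)]
          simp [pvEvens]
        · rw [if_neg he, if_neg (by omega : ¬ (i - 1) % 2 = 0),
              if_pos (by omega : (i + 1 - 1) % 2 = 0)]
          simp [pvOdds]

-- ===== VERDICT (by name: the statement is the Claim_ definition above) =====
theorem solution_spec : Claim_equal_solution := by
  intro code _
  have hA : (solutionLoop code.toList 0 0 []).2
      = pvEvens (code.toList.filter (fun c => c != '1')) := by
    rw [pvLoop_eq code.toList 0 0 [] (Or.inl rfl)]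
    norm_num
  simp only [Spec_solution, solution, solution_alt, hA, pvSlice2_eq_evens]
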